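-- pv_equiv track=rewrite | github.com/CaiMugino/RLSO | rlso/recommendation_aggregate.py | find_1stValue_key
-- ===== SOURCE A (Python) =====
-- def find_1stValue_key(click_items, item1_count_dic):
--     cur_item1s = item1_count_dic.keys()
--     max_value = 0
--     aim_key = 0
--     # 对于当前session每个浏览的商品（按照浏览顺序）
--     for item in click_items:
--         if item in cur_item1s:
--             if item1_count_dic[item] > max_value:
--                 max_value = item1_count_dic[item]
--                 aim_key = item
--     return aim_key
-- ===== SOURCE B (Python) =====
-- def find_1stValue_key(click_items, item1_count_dic):
--     candidates = [x for x in click_items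
--                   if x in item1_count_dic and item1_count_dic[x] > 0]
--     if not candidates:
--         return 0
--     m = max(item1_count_dic[x] for x in candidates)
--     for x in candidates:
--         if item1_count_dic[x] == m:
--             return x
-- ===== Notes on version B (the rewrite author's own statement) =====
-- stated objective: alternative
-- what changed: Replaces the single running-max state loop with a filter of positive-count clicked items, a max over their counts, and a first-match scan in click order.
import Mathlib
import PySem

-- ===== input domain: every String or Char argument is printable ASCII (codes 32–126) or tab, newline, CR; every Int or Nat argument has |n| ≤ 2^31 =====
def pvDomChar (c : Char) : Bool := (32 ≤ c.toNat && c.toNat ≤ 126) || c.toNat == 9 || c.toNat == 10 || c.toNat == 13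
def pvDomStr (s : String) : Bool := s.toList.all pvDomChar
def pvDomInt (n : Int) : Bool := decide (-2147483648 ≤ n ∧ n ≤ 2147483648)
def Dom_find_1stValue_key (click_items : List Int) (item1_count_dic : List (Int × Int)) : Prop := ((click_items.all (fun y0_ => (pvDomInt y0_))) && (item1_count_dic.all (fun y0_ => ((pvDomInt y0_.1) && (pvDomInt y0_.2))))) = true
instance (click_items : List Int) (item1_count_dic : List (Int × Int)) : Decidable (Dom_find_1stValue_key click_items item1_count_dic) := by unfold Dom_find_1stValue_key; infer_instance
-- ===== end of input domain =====

-- B replaces A's single running-max state loop by filter / max / first-match passes (alternative decomposition, same cost).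

-- ===== PORT A =====
-- A's loop body: membership test, then compare-and-update of the (max_value, aim_key) state
def find1stStep (item1_count_dic : List (Int × Int)) (st : Int × Int) (item : Int) : Int × Int :=
  match List.lookup item item1_count_dic with
  | some v => if v > st.1 then (v, item) else st
  | none => st

def find_1stValue_key (click_items : List Int) (item1_count_dic : List (Int × Int)) : Int :=
  (click_items.foldl (find1stStep item1_count_dic) (0, 0)).2

-- ===== PORT B =====
-- item1_count_dic[x] (only consulted where membership holds, so the 0 default is never the result)
def altCount (item1_count_dic : List (Int × Int)) (x : Int) : Int :=
  (List.lookup x item1_count_dic).getD 0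

-- 'x in item1_count_dic and item1_count_dic[x] > 0'
def altKeep (item1_count_dic : List (Int × Int)) (x : Int) : Bool :=
  (List.lookup x item1_count_dic).isSome && decide (altCount item1_count_dic x > 0)

-- 'if not candidates: return 0' (max? = none ↔ empty); 'm = max(...)'; the first-match for-loop
def altPick (item1_count_dic : List (Int × Int)) (candidates : List Int) : Int :=
  match PySem.List.max? (candidates.map (altCount item1_count_dic)) (fun y => y) with
  | none => 0
  | some m =>
    match candidates.find? (fun x => altCount item1_count_dic x == m) with
    | some x => x
    | none => 0

def find_1stValue_key_alt (click_items : List Int) (item1_count_dic : List (Int × Int)) : Int :=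
  altPick item1_count_dic (click_items.filter (altKeep item1_count_dic))

-- ===== PRECONDITION & SPEC =====
def Spec_find_1stValue_key (click_items : List Int) (item1_count_dic : List (Int × Int)) (out : Int) : Prop := out = find_1stValue_key_alt click_items item1_count_dic
instance (click_items : List Int) (item1_count_dic : List (Int × Int)) (out : Int) : Decidable (Spec_find_1stValue_key click_items item1_count_dic out) := by unfold Spec_find_1stValue_key; infer_instance

-- ===== CLAIM (what is proved, stated in full; the proofs are below) =====
def Claim_equal_find_1stValue_key : Prop := ∀ (click_items : List Int) (item1_count_dic : List (Int × Int)), Dom_find_1stValue_key click_items item1_count_dic → Spec_find_1stValue_key click_items item1_count_dic (find_1stValue_key click_items item1_count_dic)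

-- ===== LEMMAS AND PROOFS =====

-- altPick with a general default, to carry A's accumulator through the induction
def pickD (d : List (Int × Int)) (c : List Int) (dflt : Int) : Int :=
  match PySem.List.max? (c.map (altCount d)) (fun y => y) with
  | none => dflt
  | some m => (c.find? (fun x => altCount d x == m)).getD dflt

lemma altPick_eq_pickD (d : List (Int × Int)) (c : List Int) :
    altPick d c = pickD d c 0 := by
  unfold altPick pickD
  cases PySem.List.max? (c.map (altCount d)) (fun y => y) with
  | none => rfl
  | some m =>
    cases h : c.find? (fun x => altCount d x == m) with
    | none => simp [h]
    | some x => simp [h]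

lemma max?_id_eq_of {l : List Int} {m : Int} (hmem : m ∈ l) (hub : ∀ y ∈ l, y ≤ m) :
    PySem.List.max? l (fun y => y) = some m := by
  cases h : PySem.List.max? l (fun y => y) with
  | none =>
    rw [PySem.List.max?_eq_none_iff] at h
    subst h; cases hmem
  | some m' =>
    have h1 : m' ≤ m := hub m' (PySem.List.max?_mem h)
    have h2 : m ≤ m' := by simpa using PySem.List.max?_isMax h m hmem
    have : m' = m := le_antisymm h1 h2
    rw [this]

lemma find?_filter_eq (p q : Int → Bool) (l : List Int) :
    (l.filter q).find? p = l.find? (fun a => p a && q a) := by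
  induction l with
  | nil => rfl
  | cons x t ih =>
    by_cases hq : q x = true
    · by_cases hp : p x = true
      · simp [hq, hp]
      · simp [hq, hp, ih]
    · simp [hq, ih]

-- the crux: absorbing a new running maximum x (count v) into the candidate view
lemma pick_shift (d : List (Int × Int)) (xs : List Int) (mv v x dflt : Int)
    (hmv : 0 ≤ mv) (hv : mv < v) (hx : altCount d x = v)
    (hmem : (List.lookup x d).isSome = true) :
    pickD d (xs.filter (fun y => (List.lookup y d).isSome && decide (altCount d y > v))) x
      = pickD d (x :: xs.filter (fun y => (List.lookup y d).isSome && decide (altCount d y > mv))) dflt := by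
  set qv : Int → Bool := fun y => (List.lookup y d).isSome && decide (altCount d y > v) with hqv
  set qm : Int → Bool := fun y => (List.lookup y d).isSome && decide (altCount d y > mv) with hqm
  have hsub : ∀ y, y ∈ xs.filter qv → y ∈ xs.filter qm := by
    intro y hy
    rw [List.mem_filter] at hy ⊢
    refine ⟨hy.1, ?_⟩
    have := hy.2
    simp only [hqv, hqm, Bool.and_eq_true, decide_eq_true_iff] at *
    exact ⟨this.1, by omega⟩
  cases hc : xs.filter qv with
  | nil =>
    -- no clicked item beats v: both sides pick x
    have hub : ∀ z ∈ (x :: xs.filter qm).map (altCount d), z ≤ v := by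
      intro z hz
      rw [List.mem_map] at hz
      obtain ⟨y, hy, rfl⟩ := hz
      rcases List.mem_cons.mp hy with rfl | hy
      · omega
      · by_contra hgt
        have : y ∈ xs.filter qv := by
          rw [List.mem_filter] at *
          refine ⟨hy.1, ?_⟩
          have := hy.2
          simp only [hqv, hqm, Bool.and_eq_true, decide_eq_true_iff] at *
          exact ⟨this.1, by omega⟩
        rw [hc] at this; cases this
    have hmax : PySem.List.max? ((x :: xs.filter qm).map (altCount d)) (fun y => y) = some v :=
      max?_id_eq_of (by simp [hx]) hub
    have h0 : PySem.List.max? (([] : List Int).map (altCount d)) (fun y => y) = none := by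
      rw [PySem.List.max?_eq_none_iff]; rfl
    simp only [pickD, h0, hmax]
    simp [hx]
  | cons y0 t0 =>
    have hne : (xs.filter qv).map (altCount d) ≠ [] := by simp [hc]
    rw [← hc]
    cases hm : PySem.List.max? ((xs.filter qv).map (altCount d)) (fun y => y) with
    | none => rw [PySem.List.max?_eq_none_iff] at hm; exact absurd hm hne
    | some m =>
      have hmmem := PySem.List.max?_mem hm
      have hmub := PySem.List.max?_isMax hm
      rw [List.mem_map] at hmmem
      obtain ⟨z, hz, hzm⟩ := hmmem
      have hzv : altCount d z > v := by
        rw [List.mem_filter] at hz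
        have := hz.2
        simp only [hqv, Bool.and_eq_true, decide_eq_true_iff] at this
        exact this.2
      have hmv' : v < m := by omega
      -- the maximum over the widened candidate list is still m
      have hmax2 : PySem.List.max? ((x :: xs.filter qm).map (altCount d)) (fun y => y) = some m := by
        apply max?_id_eq_of
        · exact List.mem_map.mpr ⟨z, List.mem_cons_of_mem _ (hsub z hz), hzm⟩
        · intro w hw
          rw [List.mem_map] at hw
          obtain ⟨y, hy, rfl⟩ := hw
          rcases List.mem_cons.mp hy with rfl | hy
          · omega
          · by_cases hyv : altCount d y > v
            · have hyc : y ∈ xs.filter qv := by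
                rw [List.mem_filter] at *
                refine ⟨hy.1, ?_⟩
                have := hy.2
                simp only [hqv, hqm, Bool.and_eq_true, decide_eq_true_iff] at *
                exact ⟨this.1, hyv⟩
              have := hmub (altCount d y) (List.mem_map.mpr ⟨y, hyc, rfl⟩)
              simpa using this
            · omega
      -- both find?s reduce to the same search over xs
      have hpred : (fun a => (altCount d a == m) && qv a) = (fun a => (altCount d a == m) && qm a) := by
        funext a
        by_cases ha : altCount d a = m
        · have hap : (0:Int) < altCount d a := by omega
          have hsome : (List.lookup a d).isSome = true := by
            cases hla : List.lookup a d with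
            | none => simp [altCount, hla] at hap
            | some w => rfl
          simp only [hqv, hqm, ha, hsome]
          have t1 : m > v := hmv'
          have t2 : m > mv := by omega
          simp [t1, t2]
        · have hfalse : (altCount d a == m) = false := by simpa using ha
          rw [hfalse]
          simp
      have hzx := List.mem_filter.mp hz
      have hfind : xs.find? (fun a => (altCount d a == m) && qv a) ≠ none := by
        intro hf
        have hnp := List.find?_eq_none.mp hf z hzx.1
        exact hnp (by simp [hzm, hzx.2])
      obtain ⟨w, hw⟩ := Option.ne_none_iff_exists'.mp hfind
      have hhead : List.find? (fun y => altCount d y == m) (x :: xs.filter qm)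
          = List.find? (fun y => altCount d y == m) (xs.filter qm) :=
        List.find?_cons_of_neg (by simp [hx]; omega)
      simp only [pickD, hm, hmax2, hhead]
      rw [find?_filter_eq, find?_filter_eq, ← hpred, hw]
      rfl

lemma main_loop (d : List (Int × Int)) (xs : List Int) :
    ∀ mv ak : Int, 0 ≤ mv →
    (xs.foldl (find1stStep d) (mv, ak)).2
      = pickD d (xs.filter
          (fun x => (List.lookup x d).isSome && decide (altCount d x > mv))) ak := by
  induction xs with
  | nil => intro mv ak _; simp [pickD, PySem.List.max?]
  | cons x xs ih =>
    intro mv ak hmv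
    cases hl : List.lookup x d with
    | none =>
      have hpx : ((List.lookup x d).isSome && decide (altCount d x > mv)) = false := by
        simp [hl]
      have hstep : find1stStep d (mv, ak) x = (mv, ak) := by simp [find1stStep, hl]
      simp only [List.foldl_cons, hstep, List.filter_cons, hpx]
      simpa using ih mv ak hmv
    | some v =>
      have hcx : altCount d x = v := by simp [altCount, hl]
      by_cases hv : v > mv
      · have hstep : find1stStep d (mv, ak) x = (v, x) := by simp [find1stStep, hl, hv]
        have hpx : ((List.lookup x d).isSome && decide (altCount d x > mv)) = true := by
          simp [hl, hcx]; omega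
        simp only [List.foldl_cons, hstep, List.filter_cons, hpx, if_true]
        rw [ih v x (by omega)]
        exact pick_shift d xs mv v x ak hmv hv hcx (by simp [hl])
      · have hstep : find1stStep d (mv, ak) x = (mv, ak) := by simp [find1stStep, hl, hv]
        have hpx : ((List.lookup x d).isSome && decide (altCount d x > mv)) = false := by
          simp [hl, hcx]; omega
        simp only [List.foldl_cons, hstep, List.filter_cons, hpx]
        simpa using ih mv ak hmv

theorem find_1stValue_key_spec : Claim_equal_find_1stValue_key := by
  intro xs d _
  unfold Spec_find_1stValue_key find_1stValue_key find_1stValue_key_alt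
  rw [altPick_eq_pickD, main_loop d xs 0 0 le_rfl]
  rfl
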